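-- pv_equiv track=rewrite | github.com/scikit-learn/scikit-learn | venv/lib/python3.5/site-packages/dask/dataframe/io/io.py | sorted_division_locations
-- ===== SOURCE A (Python) =====
-- from math import ceil
--
-- def sorted_division_locations(seq, npartitions=None, chunksize=None):
--     """ Find division locations and values in sorted list
--
--     Examples
--     --------
--
--     >>> L = ['A', 'B', 'C', 'D', 'E', 'F']
--     >>> sorted_division_locations(L, chunksize=2)
--     (['A', 'C', 'E', 'F'], [0, 2, 4, 6])
--
--     >>> sorted_division_locations(L, chunksize=3)
--     (['A', 'D', 'F'], [0, 3, 6])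
--
--     >>> L = ['A', 'A', 'A', 'A', 'B', 'B', 'B', 'C']
--     >>> sorted_division_locations(L, chunksize=3)
--     (['A', 'B', 'C'], [0, 4, 8])
--
--     >>> sorted_division_locations(L, chunksize=2)
--     (['A', 'B', 'C'], [0, 4, 8])
--
--     >>> sorted_division_locations(['A'], chunksize=2)
--     (['A', 'A'], [0, 1])
--     """
--     if ((npartitions is None) == (chunksize is None)):
--         raise ValueError('Exactly one of npartitions and chunksize must be specified.')
--
--     if npartitions:
--         chunksize = ceil(len(seq) / npartitions)
--
--     positions = [0]
--     values = [seq[0]]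
--     for pos in list(range(0, len(seq), chunksize)):
--         if pos <= positions[-1]:
--             continue
--         while pos + 1 < len(seq) and seq[pos - 1] == seq[pos]:
--             pos += 1
--         values.append(seq[pos])
--         if pos == len(seq) - 1:
--             pos += 1
--         positions.append(pos)
--
--     if positions[-1] != len(seq):
--         positions.append(len(seq))
--         values.append(seq[-1])
--
--     return values, positions
-- ===== SOURCE B (Python) =====
-- from math import ceil
--
--
-- def sorted_division_locations(seq, npartitions=None, chunksize=None):
--     """Find division locations and values in sorted list.
--
--     One pass over the precomputed run-start indices: a run start s becomes a
--     division exactly when a chunk multiple falls in the gap since the previous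
--     run start (a floor-division test), with n-1 standing in when the chunk
--     multiples outrun the last run start; positions/values are then assembled
--     by comprehensions."""
--     if ((npartitions is None) == (chunksize is None)):
--         raise ValueError('Exactly one of npartitions and chunksize must be specified.')
--
--     if npartitions:
--         chunksize = ceil(len(seq) / npartitions)
--
--     n = len(seq)
--     first = seq[0]
--     starts = [j for j in range(1, n) if seq[j - 1] != seq[j]]
--
--     uniq = []
--     if chunksize > 0:
--         prev = 0
--         for s in starts:
--             if s // chunksize > prev // chunksize:
--                 uniq.append(s)
--             prev = s
--         if (n - 1) // chunksize > prev // chunksize: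
--             uniq.append(n - 1)
--
--     mids = [b for b in uniq if b != n - 1]
--     positions = [0] + mids + [n]
--     values = [first] + [seq[b] for b in mids] + [seq[-1]]
--     return values, positions
-- ===== Notes on version B (the rewrite author's own statement) =====
-- stated objective: alternative
-- what changed: A's loop over chunk-start positions with an inner while-scan past duplicate runs is replaced by a single pass over the precomputed run-start indices that selects a run start exactly when a chunk multiple falls in the gap since the previous one (a floor-division test, with n-1 as the overflow division); positions and values are then assembled by comprehensions instead of being accumulated with skip/bump logic.
import Mathlib
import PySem

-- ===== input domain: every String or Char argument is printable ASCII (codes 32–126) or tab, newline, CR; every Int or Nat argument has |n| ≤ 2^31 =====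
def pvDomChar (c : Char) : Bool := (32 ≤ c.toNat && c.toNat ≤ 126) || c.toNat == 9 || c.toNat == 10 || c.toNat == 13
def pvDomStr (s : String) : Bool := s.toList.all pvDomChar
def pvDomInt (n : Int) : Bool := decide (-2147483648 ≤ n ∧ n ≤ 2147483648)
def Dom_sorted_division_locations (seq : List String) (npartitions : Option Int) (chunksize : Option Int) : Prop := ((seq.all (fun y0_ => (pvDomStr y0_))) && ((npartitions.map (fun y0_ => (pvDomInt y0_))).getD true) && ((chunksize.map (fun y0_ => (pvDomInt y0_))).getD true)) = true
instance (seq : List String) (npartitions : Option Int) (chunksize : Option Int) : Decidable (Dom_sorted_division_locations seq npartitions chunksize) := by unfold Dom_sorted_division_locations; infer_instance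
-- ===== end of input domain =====

-- B replaces A's chunk-start loop with its inner duplicate-run while-scan by one pass
-- over the precomputed run-start indices (a run start is kept iff a chunk multiple falls
-- in the gap since the previous one, a floor-division test) and assembles the output by
-- comprehensions; same return value.

-- ===== PORT A =====
-- effective chunksize: `if npartitions: chunksize = ceil(len(seq) / npartitions)`
-- (exact integer ceiling; Python's float ceil is exact for |len|,|npartitions| ≤ 2^31)
def sdlChunk (n : Int) (np cs : Option Int) : Int :=
  match np with
  | some p => if p ≠ 0 then -(PySem.Int.floordiv (-n) p) else cs.getD 0
  | none => cs.getD 0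

-- `while pos + 1 < len(seq) and seq[pos-1] == seq[pos]: pos += 1`
def sdlWhile (seq : List String) (pos : Int) : Int :=
  if h : pos + 1 < (seq.length : Int) ∧ PySem.List.pyGetD seq (pos - 1) "" = PySem.List.pyGetD seq pos "" then
    sdlWhile seq (pos + 1)
  else pos
termination_by ((seq.length : Int) - pos).toNat
decreasing_by omega

-- A's loop body: skip guard, while-scan, append value, bump at the end, append position
def sdlStepA (seq : List String) (n : Int) (st : List String × List Int) (pos : Int) : List String × List Int :=
  if pos ≤ PySem.List.pyGetD st.2 (-1) 0 then st
  else
    let pos2 := sdlWhile seq pos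
    (st.1 ++ [PySem.List.pyGetD seq pos2 ""], st.2 ++ [if pos2 = n - 1 then pos2 + 1 else pos2])

def sorted_division_locations (seq : List String) (npartitions : Option Int) (chunksize : Option Int) : List String × List Int :=
  let n : Int := seq.length
  let chunk := sdlChunk n npartitions chunksize
  let st := (PySem.List.pyRange 0 n chunk).foldl (sdlStepA seq n)
    ([PySem.List.pyGetD seq 0 ""], ([0] : List Int))
  if PySem.List.pyGetD st.2 (-1) 0 ≠ n then
    (st.1 ++ [PySem.List.pyGetD seq (-1) ""], st.2 ++ [n])
  else st

-- ===== PORT B =====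
-- `starts = [j for j in range(1, n) if seq[j-1] != seq[j]]`
def sdlStarts (seq : List String) : List Int :=
  (PySem.List.pyRange 1 (seq.length : Int) 1).filter
    (fun j => decide (PySem.List.pyGetD seq (j - 1) "" ≠ PySem.List.pyGetD seq j ""))

def sorted_division_locations_alt (seq : List String) (npartitions : Option Int) (chunksize : Option Int) : List String × List Int :=
  let n : Int := seq.length
  let c := sdlChunk n npartitions chunksize
  let first := PySem.List.pyGetD seq 0 ""
  let starts := sdlStarts seq
  -- `for s in starts: if s // c > prev // c: uniq.append(s); prev = s` + the n-1 cap
  let uniq :=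
    if c > 0 then
      let st := starts.foldl (fun (st : List Int × Int) s =>
        (if PySem.Int.floordiv s c > PySem.Int.floordiv st.2 c then st.1 ++ [s] else st.1, s))
        (([] : List Int), 0)
      if PySem.Int.floordiv (n - 1) c > PySem.Int.floordiv st.2 c then st.1 ++ [n - 1] else st.1
    else []
  let mids := uniq.filter (fun b => decide (b ≠ n - 1))
  ([first] ++ mids.map (fun b => PySem.List.pyGetD seq b "") ++ [PySem.List.pyGetD seq (-1) ""],
   ([0] : List Int) ++ mids ++ [n])

-- ===== PRECONDITION & SPEC =====
-- Pre_ excludes exactly the inputs on which the Python A raises: empty seq (IndexError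
-- on seq[0]), not exactly one of npartitions/chunksize given (ValueError), npartitions = 0
-- with chunksize None (TypeError: chunksize stays None), chunksize 0, or an effective
-- ceil-chunksize of 0 (range step 0, ValueError); A returns on every input satisfying Pre_.
def Pre_sorted_division_locations (seq : List String) (npartitions : Option Int) (chunksize : Option Int) : Prop :=
  seq ≠ [] ∧
  ((npartitions = none ∧ chunksize ≠ none ∧ chunksize ≠ some 0) ∨
   (chunksize = none ∧ npartitions ≠ none ∧ npartitions ≠ some 0 ∧
     -(PySem.Int.floordiv (-(seq.length : Int)) (npartitions.getD 1)) ≠ 0))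
instance (seq : List String) (npartitions : Option Int) (chunksize : Option Int) : Decidable (Pre_sorted_division_locations seq npartitions chunksize) := by unfold Pre_sorted_division_locations; infer_instance

def pvWitness_sorted_division_locations : List String × Option Int × Option Int := (["A", "A", "B", "C"], none, some 2)

def Spec_sorted_division_locations (seq : List String) (npartitions : Option Int) (chunksize : Option Int) (out : List String × List Int) : Prop := out = sorted_division_locations_alt seq npartitions chunksize
instance (seq : List String) (npartitions : Option Int) (chunksize : Option Int) (out : List String × List Int) : Decidable (Spec_sorted_division_locations seq npartitions chunksize out) := by unfold Spec_sorted_division_locations; infer_instance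

-- ===== CLAIM (what is proved, stated in full; the proofs are below) =====
def Claim_equal_sorted_division_locations : Prop := ∀ (seq : List String) (npartitions : Option Int) (chunksize : Option Int), Dom_sorted_division_locations seq npartitions chunksize → Pre_sorted_division_locations seq npartitions chunksize → Spec_sorted_division_locations seq npartitions chunksize (sorted_division_locations seq npartitions chunksize)

-- ===== LEMMAS AND PROOFS =====

-- membership description of the run-start list
theorem mem_sdlStarts (seq : List String) (j : Int) :
    j ∈ sdlStarts seq ↔ (1 ≤ j ∧ j < (seq.length : Int) ∧
      PySem.List.pyGetD seq (j - 1) "" ≠ PySem.List.pyGetD seq j "") := by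
  simp [sdlStarts, List.mem_filter, PySem.List.mem_pyRange_one]
  tauto

-- the run-start list is strictly increasing
theorem sdlStarts_pairwise (seq : List String) : (sdlStarts seq).Pairwise (· < ·) :=
  List.Pairwise.sublist List.filter_sublist (PySem.List.pairwise_lt_pyRange_one 1 (seq.length : Int))

-- a pyRange with positive step is strictly increasing
theorem pyRange_pos_pairwise (a b c : Int) (hc : 0 < c) :
    (PySem.List.pyRange a b c).Pairwise (· < ·) := by
  rw [PySem.List.pyRange_of_pos a b hc, List.pairwise_map]
  apply List.Pairwise.imp ?_ List.pairwise_lt_range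
  intro i j hij
  have hij' : (i : Int) < (j : Int) := by exact_mod_cast hij
  nlinarith

-- a pyRange with negative step and a ≤ b is empty
theorem pyRange_eq_nil_of_neg (a b s : Int) (hs : s < 0) (hab : a ≤ b) :
    PySem.List.pyRange a b s = [] := by
  simp only [PySem.List.pyRange]
  split_ifs with h1 h2 h3 <;> first | rfl | omega

-- seq[len-1] is seq[-1]
theorem pyGetD_len_sub_one (seq : List String) (h : seq ≠ []) :
    PySem.List.pyGetD seq ((seq.length : Int) - 1) "" = PySem.List.pyGetD seq (-1) "" := by
  have hlen : 0 < seq.length := List.length_pos_iff.mpr h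
  rw [PySem.List.pyGetD_neg_one seq "" h,
      PySem.List.pyGetD_eq_getElem seq (i := (seq.length : Int) - 1) "" (by omega) (by omega)]
  rw [List.getLast_eq_getElem]
  congr 1
  omega

-- arithmetic: a gap in floor quotients contains a multiple
theorem ediv_gap {c last x : Int} (hc : 0 < c) (h : last / c < x / c) :
    ∃ q, c ∣ q ∧ last < q ∧ q ≤ x := by
  refine ⟨(last / c + 1) * c, ⟨last / c + 1, mul_comm _ _⟩,
    Int.lt_ediv_add_one_mul_self last hc, ?_⟩
  exact (Int.le_ediv_iff_mul_le hc).mp (by omega)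

-- arithmetic: no multiple in (last, x] means equal floor quotients
theorem no_mult_fdiv_eq {c last x : Int} (hc : 0 < c) (hlx : last ≤ x)
    (hnm : ∀ q, c ∣ q → last < q → q ≤ x → False) : x / c = last / c := by
  have h1 := Int.ediv_le_ediv hc hlx
  rcases lt_or_eq_of_le h1 with h | h
  · obtain ⟨q, hq1, hq2, hq3⟩ := ediv_gap hc h
    exact (hnm q hq1 hq2 hq3).elim
  · omega

-- arithmetic: a multiple strictly above last has a strictly larger floor quotient
theorem mult_fdiv_gt {c last p : Int} (hc : 0 < c) (h : c ∣ p) (hlp : last < p) :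
    last / c < p / c := by
  by_contra hle
  push_neg at hle
  have h1 : p / c * c ≤ last / c * c := mul_le_mul_of_nonneg_right hle (le_of_lt hc)
  have h2 := Int.ediv_mul_le last (ne_of_gt hc)
  have h3 := Int.ediv_mul_cancel h
  omega

-- proof-side recursion describing B's selection loop (run starts after `prev`, plus the cap)
def selGo (c n : Int) : List Int → Int → List Int
  | [], prev => if (n - 1) / c > prev / c then [n - 1] else []
  | s :: ss, prev => if s / c > prev / c then s :: selGo c n ss s else selGo c n ss s

-- the mids produced by the selection when resumed after `last`
def selMids (seq : List String) (c last : Int) : List Int :=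
  (selGo c (seq.length : Int) ((sdlStarts seq).filter (fun s => decide (last < s))) last).filter
    (fun b => decide (b ≠ (seq.length : Int) - 1))

-- A's trailing `if positions[-1] != len(seq): …` tail-append
def sdlTail (seq : List String) (st : List String × List Int) : List String × List Int :=
  if PySem.List.pyGetD st.2 (-1) 0 ≠ (seq.length : Int) then
    (st.1 ++ [PySem.List.pyGetD seq (-1) ""], st.2 ++ [(seq.length : Int)])
  else st

-- B's append-accumulator loop plus cap equals selGo
theorem uniq_eq_selGo (c n : Int) (hc : 0 < c) :
    ∀ (ss : List Int) (acc : List Int) (prev : Int),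
    (if PySem.Int.floordiv (n - 1) c >
        PySem.Int.floordiv (ss.foldl (fun (st : List Int × Int) s =>
          (if PySem.Int.floordiv s c > PySem.Int.floordiv st.2 c then st.1 ++ [s] else st.1, s))
          (acc, prev)).2 c then
       (ss.foldl (fun (st : List Int × Int) s =>
          (if PySem.Int.floordiv s c > PySem.Int.floordiv st.2 c then st.1 ++ [s] else st.1, s))
          (acc, prev)).1 ++ [n - 1]
     else
       (ss.foldl (fun (st : List Int × Int) s =>
          (if PySem.Int.floordiv s c > PySem.Int.floordiv st.2 c then st.1 ++ [s] else st.1, s))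
          (acc, prev)).1)
    = acc ++ selGo c n ss prev := by
  intro ss
  induction ss with
  | nil =>
    intro acc prev
    simp [selGo, PySem.Int.floordiv_eq_ediv_of_pos hc]
    split_ifs <;> simp
  | cons s ss ih =>
    intro acc prev
    simp only [List.foldl_cons, selGo, PySem.Int.floordiv_eq_ediv_of_pos hc] at *
    by_cases h : s / c > prev / c
    · rw [if_pos h, if_pos h]
      rw [ih (acc ++ [s]) s]
      simp
    · rw [if_neg h, if_neg h]
      exact ih acc s

-- selection is empty when every candidate (and the cap) shares last's quotient
theorem selGo_all_eq (c n : Int) :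
    ∀ (ss : List Int) (prev last : Int),
    (∀ s ∈ ss, s / c = last / c) → prev / c = last / c → (n - 1) / c = last / c →
    selGo c n ss prev = [] := by
  intro ss
  induction ss with
  | nil => intro prev last h hp hcap; simp [selGo, hp, hcap]
  | cons s ss ih =>
    intro prev last h hp hcap
    have hs := h s List.mem_cons_self
    simp only [selGo, hs, hp, gt_iff_lt, lt_self_iff_false, if_false]
    exact ih s last (fun q hq => h q (List.mem_cons_of_mem _ hq)) hs hcap

-- selection yields exactly [n-1] when every candidate below n-1 shares last's quotient
theorem selGo_lastonly (c n last : Int) :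
    ∀ (ss : List Int) (prev : Int),
    ss.Pairwise (· < ·) → (∀ s ∈ ss, s < n ∧ (s / c = last / c ∨ s = n - 1)) →
    prev / c = last / c → (n - 1) / c > last / c →
    selGo c n ss prev = [n - 1] := by
  intro ss
  induction ss with
  | nil => intro prev _ _ hp hcap; simp [selGo, hp, hcap]
  | cons s ss ih =>
    intro prev hpw hss hp hcap
    rcases (hss s List.mem_cons_self).2 with heq | hlast
    · simp only [selGo, heq, hp, gt_iff_lt, lt_self_iff_false, if_false]
      exact ih s (List.pairwise_cons.mp hpw).2
        (fun q hq => hss q (List.mem_cons_of_mem _ hq)) heq hcap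
    · subst hlast
      have hnil : ss = [] := by
        rcases ss with _ | ⟨q, ss'⟩
        · rfl
        · have hq1 := ((List.pairwise_cons.mp hpw).1 q List.mem_cons_self)
          have hq2 := (hss q (List.mem_cons_of_mem _ List.mem_cons_self)).1
          omega
      subst hnil
      simp [selGo, hp, hcap]

-- selection cons-step: the first selected element b splits the recursion
theorem selGo_step (c n last b : Int) :
    ∀ (ss : List Int) (prev : Int),
    ss.Pairwise (· < ·) → b ∈ ss →
    (∀ s ∈ ss, s < b → s / c = last / c) →
    prev / c = last / c → last / c < b / c →
    selGo c n ss prev = b :: selGo c n (ss.filter (fun s => decide (b < s))) b := by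
  intro ss
  induction ss with
  | nil => intro prev _ hb; exact absurd hb (List.not_mem_nil)
  | cons s ss ih =>
    intro prev hpw hb hlt hp hbgt
    rcases List.mem_cons.mp hb with hbs | hb'
    · subst hbs
      have hcond : b / c > prev / c := by rw [hp]; exact hbgt
      rw [show selGo c n (b :: ss) prev = b :: selGo c n ss b from by
        simp only [selGo, hcond, if_pos]]
      have hfs : (b :: ss).filter (fun q => decide (b < q)) = ss := by
        rw [List.filter_cons]
        simp only [lt_self_iff_false, decide_false, Bool.false_eq_true, if_false]
        exact List.filter_eq_self.mpr
          (fun q hq => decide_eq_true ((List.pairwise_cons.mp hpw).1 q hq))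
      rw [hfs]
    · have hsb : s < b := (List.pairwise_cons.mp hpw).1 b hb'
      have hs := hlt s List.mem_cons_self hsb
      rw [show selGo c n (s :: ss) prev = selGo c n ss s from by
        simp only [selGo, hs, hp, gt_iff_lt, lt_self_iff_false, if_false]]
      have hfs : (s :: ss).filter (fun q => decide (b < q)) = ss.filter (fun q => decide (b < q)) := by
        rw [List.filter_cons]
        simp [not_lt.mpr (le_of_lt hsb)]
      rw [hfs]
      exact ih s (List.pairwise_cons.mp hpw).2 hb'
        (fun q hq hqb => hlt q (List.mem_cons_of_mem _ hq) hqb) hs hbgt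

-- properties of the while-scan: it never moves backwards, stays below len,
-- passes only equal neighbours, and stops at a run start or at len-1
theorem sdlWhile_props (seq : List String) (p : Int) (h1 : 1 ≤ p) (h2 : p < (seq.length : Int)) :
    p ≤ sdlWhile seq p ∧ sdlWhile seq p ≤ (seq.length : Int) - 1 ∧
    (∀ j, p ≤ j → j < sdlWhile seq p →
      PySem.List.pyGetD seq (j - 1) "" = PySem.List.pyGetD seq j "") ∧
    (PySem.List.pyGetD seq (sdlWhile seq p - 1) "" ≠ PySem.List.pyGetD seq (sdlWhile seq p) "" ∨
      sdlWhile seq p = (seq.length : Int) - 1) := by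
  by_cases h : p + 1 < (seq.length : Int) ∧
      PySem.List.pyGetD seq (p - 1) "" = PySem.List.pyGetD seq p ""
  · have heq : sdlWhile seq p = sdlWhile seq (p + 1) := by rw [sdlWhile, dif_pos h]
    obtain ⟨ha, hb, hcc, hd⟩ := sdlWhile_props seq (p + 1) (by omega) (by omega)
    rw [heq]
    refine ⟨by omega, hb, ?_, hd⟩
    intro j hj1 hj2
    rcases eq_or_lt_of_le hj1 with hj | hj
    · subst hj; exact h.2
    · exact hcc j (by omega) hj2
  · have heq : sdlWhile seq p = p := by rw [sdlWhile, dif_neg h]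
    rw [heq]
    refine ⟨le_refl _, by omega, fun j hj1 hj2 => by omega, ?_⟩
    by_cases he : PySem.List.pyGetD seq (p - 1) "" = PySem.List.pyGetD seq p ""
    · right
      have hnlt : ¬ (p + 1 < (seq.length : Int)) := fun hl => h ⟨hl, he⟩
      omega
    · left; exact he
termination_by ((seq.length : Int) - p).toNat
decreasing_by omega

-- a loop step with pos not past the stored last position is the identity
theorem stepA_skip (seq : List String) (nI : Int) (st : List String × List Int) (p : Int)
    (h : p ≤ PySem.List.pyGetD st.2 (-1) 0) : sdlStepA seq nI st p = st := by
  simp [sdlStepA, h]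

-- once the stored last position dominates everything left, the fold is the identity
theorem foldA_id (seq : List String) (nI : Int) :
    ∀ (L : List Int) (st : List String × List Int),
    (∀ q ∈ L, q ≤ PySem.List.pyGetD st.2 (-1) 0) →
    L.foldl (sdlStepA seq nI) st = st := by
  intro L
  induction L with
  | nil => intro st _; rfl
  | cons p t ih =>
    intro st h
    simp only [List.foldl_cons, stepA_skip seq nI st p (h p List.mem_cons_self)]
    exact ih st (fun q hq => h q (List.mem_cons_of_mem _ hq))

-- on a strictly increasing list the skipped prefix can be dropped by a filter
theorem foldA_drop (seq : List String) (nI : Int) :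
    ∀ (L : List Int) (st : List String × List Int), L.Pairwise (· < ·) →
    L.foldl (sdlStepA seq nI) st =
      (L.filter (fun q => decide (PySem.List.pyGetD st.2 (-1) 0 < q))).foldl (sdlStepA seq nI) st := by
  intro L
  induction L with
  | nil => intro st _; rfl
  | cons p t ih =>
    intro st hpw
    obtain ⟨hpt, hpw'⟩ := List.pairwise_cons.mp hpw
    by_cases hp : p ≤ PySem.List.pyGetD st.2 (-1) 0
    · rw [List.filter_cons]
      simp only [decide_eq_true_eq, not_lt.mpr hp, decide_false]
      simp only [List.foldl_cons, stepA_skip seq nI st p hp]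
      simpa using ih st hpw'
    · push_neg at hp
      rw [List.filter_cons]
      simp only [hp, decide_true]
      simp only [List.foldl_cons, if_pos]
      have ht : t.filter (fun q => decide (PySem.List.pyGetD st.2 (-1) 0 < q)) = t :=
        List.filter_eq_self.mpr (fun q hq => decide_eq_true (lt_trans hp (hpt q hq)))
      rw [ht]

-- MAIN INVARIANT: resuming A's loop after stored position `last`, together with the
-- trailing tail-append, appends exactly the runs B's selection picks after `last`.
theorem mainA (seq : List String) (c : Int) (hc : 0 < c) (last : Int)
    (vals : List String) (posl : List Int)
    (h0 : 0 ≤ last) (h1 : last ≤ (seq.length : Int) - 1)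
    (hst : PySem.List.pyGetD posl (-1) 0 = last) :
    sdlTail seq (((PySem.List.pyRange 0 (seq.length : Int) c).filter
        (fun q => decide (last < q))).foldl (sdlStepA seq (seq.length : Int)) (vals, posl))
    = (vals ++ (selMids seq c last).map (fun b => PySem.List.pyGetD seq b "") ++
         [PySem.List.pyGetD seq (-1) ""],
       posl ++ selMids seq c last ++ [(seq.length : Int)]) := by
  have hne : seq ≠ [] := by
    intro hnil
    rw [hnil] at h1
    simp at h1
    omega
  have hnpos : (1 : Int) ≤ (seq.length : Int) := by
    have := List.length_pos_iff.mpr hne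
    omega
  have hpwR : ((PySem.List.pyRange 0 (seq.length : Int) c).filter
      (fun q => decide (last < q))).Pairwise (· < ·) :=
    List.Pairwise.sublist List.filter_sublist (pyRange_pos_pairwise 0 _ c hc)
  rcases hR : (PySem.List.pyRange 0 (seq.length : Int) c).filter (fun q => decide (last < q))
    with _ | ⟨p, L'⟩
  · -- no multiple left: loop does nothing, tail appends (n, seq[-1]); selection is empty
    have hnomult : ∀ q, c ∣ q → last < q → q < (seq.length : Int) → False := by
      intro q hqd hql hqn
      have hmem : q ∈ PySem.List.pyRange 0 (seq.length : Int) c :=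
        (PySem.List.mem_pyRange_iff_of_pos hc q).mpr ⟨by omega, hqn, by simpa using hqd⟩
      have : q ∈ (PySem.List.pyRange 0 (seq.length : Int) c).filter
          (fun q => decide (last < q)) := List.mem_filter.mpr ⟨hmem, decide_eq_true hql⟩
      rw [hR] at this
      exact absurd this (List.not_mem_nil)
    have hmids : selMids seq c last = [] := by
      unfold selMids
      rw [selGo_all_eq c (seq.length : Int) _ last last]
      · rfl
      · intro s hs
        obtain ⟨hs1, hs2⟩ := List.mem_filter.mp hs
        have hls : last < s := of_decide_eq_true hs2
        have := (mem_sdlStarts seq s).mp hs1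
        exact no_mult_fdiv_eq hc (le_of_lt hls)
          (fun q hq1 hq2 hq3 => hnomult q hq1 hq2 (by omega))
      · rfl
      · rcases eq_or_lt_of_le h1 with h | h
        · rw [h]
        · exact no_mult_fdiv_eq hc (by omega)
            (fun q hq1 hq2 hq3 => hnomult q hq1 hq2 (by omega))
    rw [hmids]
    simp only [List.foldl_nil, sdlTail, hst]
    rw [if_pos (by omega : last ≠ (seq.length : Int))]
    simp
  · -- head multiple p: one real loop step, then recurse at the new stored position
    have hpmem : p ∈ (PySem.List.pyRange 0 (seq.length : Int) c).filter
        (fun q => decide (last < q)) := by rw [hR]; exact List.mem_cons_self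
    obtain ⟨hpr, hpl⟩ := List.mem_filter.mp hpmem
    have hlastp : last < p := of_decide_eq_true hpl
    obtain ⟨hp0, hpn, hpd⟩ := (PySem.List.mem_pyRange_iff_of_pos hc p).mp hpr
    have hpdvd : c ∣ p := by simpa using hpd
    have hmin : ∀ q, c ∣ q → last < q → q < (seq.length : Int) → p ≤ q := by
      intro q hqd hql hqn
      have hmem : q ∈ (PySem.List.pyRange 0 (seq.length : Int) c).filter
          (fun q => decide (last < q)) :=
        List.mem_filter.mpr ⟨(PySem.List.mem_pyRange_iff_of_pos hc q).mpr
          ⟨by omega, hqn, by simpa using hqd⟩, decide_eq_true hql⟩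
      rw [hR] at hmem
      rcases List.mem_cons.mp hmem with h | h
      · omega
      · exact le_of_lt ((List.pairwise_cons.mp (hR ▸ hpwR)).1 q h)
    obtain ⟨hb1, hb2, hb3, hb4⟩ := sdlWhile_props seq p (by omega) hpn
    have hfdivp : last / c < p / c := mult_fdiv_gt hc hpdvd hlastp
    -- shared sub-fact: run starts after last and below p share last's quotient
    have hsmall : ∀ s, last < s → s < p → s / c = last / c := by
      intro s hls hsp
      exact no_mult_fdiv_eq hc (le_of_lt hls)
        (fun q hq1 hq2 hq3 => by have := hmin q hq1 hq2 (by omega); omega)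
    simp only [List.foldl_cons]
    have hguard : ¬ p ≤ PySem.List.pyGetD (vals, posl).2 (-1) 0 := by
      simp only [hst]; omega
    rw [show sdlStepA seq (seq.length : Int) (vals, posl) p =
        (vals ++ [PySem.List.pyGetD seq (sdlWhile seq p) ""],
         posl ++ [if sdlWhile seq p = (seq.length : Int) - 1 then sdlWhile seq p + 1
                  else sdlWhile seq p]) from by
      simp only [sdlStepA, if_neg hguard]]
    by_cases hbn : sdlWhile seq p = (seq.length : Int) - 1
    · -- scan ran to the end: bump to n, everything later is skipped, no tail-append
      rw [if_pos hbn]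
      have hstored : PySem.List.pyGetD
          (posl ++ [sdlWhile seq p + 1]) (-1) 0 = (seq.length : Int) := by
        rw [PySem.List.pyGetD_neg_one_append_singleton]
        omega
      rw [foldA_id seq (seq.length : Int) L' _ (by
        intro q hq
        have hqm : q ∈ (PySem.List.pyRange 0 (seq.length : Int) c).filter
            (fun q => decide (last < q)) := by rw [hR]; exact List.mem_cons_of_mem _ hq
        obtain ⟨hq1, _⟩ := List.mem_filter.mp hqm
        have := ((PySem.List.mem_pyRange_iff_of_pos hc q).mp hq1).2.1
        simp only [hstored]
        omega)]
      have hmids : selMids seq c last = [] := by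
        unfold selMids
        rw [selGo_lastonly c (seq.length : Int) last _ last
          (List.Pairwise.sublist List.filter_sublist (sdlStarts_pairwise seq)) ?_ rfl ?_]
        · simp
        · intro s hs
          obtain ⟨hs1, hs2⟩ := List.mem_filter.mp hs
          have hls : last < s := of_decide_eq_true hs2
          obtain ⟨hs3, hs4, hs5⟩ := (mem_sdlStarts seq s).mp hs1
          refine ⟨hs4, ?_⟩
          rcases lt_or_ge s p with hsp | hps
          · exact Or.inl (hsmall s hls hsp)
          · right
            by_contra hsne
            exact hs5 (hb3 s hps (by omega))
        · calc last / c < p / c := hfdivp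
            _ ≤ ((seq.length : Int) - 1) / c := Int.ediv_le_ediv hc (by omega)
      simp only [sdlTail, hstored, ne_eq, not_true_eq_false, if_false]
      rw [hmids, hbn, pyGetD_len_sub_one seq hne]
      have hsucc : (seq.length : Int) - 1 + 1 = (seq.length : Int) := by omega
      rw [hsucc]
      simp
    · -- scan stopped at a run start b < n-1: recurse with last := b
      rw [if_neg hbn]
      set b := sdlWhile seq p with hbdef
      have hbstart : PySem.List.pyGetD seq (b - 1) "" ≠ PySem.List.pyGetD seq b "" := by
        rcases hb4 with h | h
        · exact h
        · exact absurd h hbn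
      have hbmem : b ∈ sdlStarts seq :=
        (mem_sdlStarts seq b).mpr ⟨by omega, by omega, hbstart⟩
      have hstored1 : PySem.List.pyGetD (posl ++ [b]) (-1) 0 = b :=
        PySem.List.pyGetD_neg_one_append_singleton posl b 0
      rw [foldA_drop seq (seq.length : Int) L' _ ((List.pairwise_cons.mp (hR ▸ hpwR)).2)]
      simp only [hstored1]
      have hfilter : L'.filter (fun q => decide (b < q)) =
          (PySem.List.pyRange 0 (seq.length : Int) c).filter (fun q => decide (b < q)) := by
        have h1 : (PySem.List.pyRange 0 (seq.length : Int) c).filter (fun q => decide (b < q)) =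
            ((PySem.List.pyRange 0 (seq.length : Int) c).filter
              (fun q => decide (last < q))).filter (fun q => decide (b < q)) := by
          rw [List.filter_filter]
          apply List.filter_congr
          intro x _
          by_cases hbx : b < x
          · simp [hbx]; omega
          · simp [hbx]
        rw [h1, hR, List.filter_cons]
        simp [not_lt.mpr hb1]
      rw [hfilter]
      have hIH := mainA seq c hc b (vals ++ [PySem.List.pyGetD seq b ""]) (posl ++ [b])
        (by omega) (by omega) hstored1
      rw [hIH]
      have hsel : selMids seq c last = b :: selMids seq c b := by
        unfold selMids
        rw [selGo_step c (seq.length : Int) last b _ last ?_ ?_ ?_ rfl ?_]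
        · have hff : ((sdlStarts seq).filter (fun s => decide (last < s))).filter
              (fun s => decide (b < s)) =
              (sdlStarts seq).filter (fun s => decide (b < s)) := by
            rw [List.filter_filter]
            apply List.filter_congr
            intro x _
            by_cases hbx : b < x
            · simp [hbx]; omega
            · simp [hbx]
          rw [hff, List.filter_cons]
          simp [hbn]
        · exact List.Pairwise.sublist List.filter_sublist (sdlStarts_pairwise seq)
        · exact List.mem_filter.mpr ⟨hbmem, decide_eq_true (by omega)⟩
        · intro s hs hsb
          obtain ⟨hs1, hs2⟩ := List.mem_filter.mp hs
          have hls : last < s := of_decide_eq_true hs2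
          obtain ⟨hs3, hs4, hs5⟩ := (mem_sdlStarts seq s).mp hs1
          rcases lt_or_ge s p with hsp | hps
          · exact hsmall s hls hsp
          · exact absurd (hb3 s hps (by omega)) hs5
        · calc last / c < p / c := hfdivp
            _ ≤ b / c := Int.ediv_le_ediv hc hb1
      rw [hsel]
      simp
termination_by ((seq.length : Int) - last).toNat
decreasing_by omega

-- ===== VERDICT (by name: the statement is the Claim_ definition above) =====
theorem sorted_division_locations_spec : Claim_equal_sorted_division_locations := by
  intro seq np cs _hdom hpre
  unfold Spec_sorted_division_locations
  obtain ⟨hseq, hpre2⟩ := hpre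
  have hn1 : (1 : Int) ≤ (seq.length : Int) := by
    have := List.length_pos_iff.mpr hseq
    omega
  have hchunk : sdlChunk (seq.length : Int) np cs ≠ 0 := by
    rcases hpre2 with ⟨hnp, hcs, hcs0⟩ | ⟨hcs, hnp, hnp0, hceil⟩
    · subst hnp
      cases cs with
      | none => exact absurd rfl hcs
      | some c =>
        simp only [sdlChunk, Option.getD_some]
        intro hc0
        exact hcs0 (by rw [hc0])
    · cases np with
      | none => exact absurd rfl hnp
      | some p =>
        have hp : p ≠ 0 := fun h => hnp0 (by rw [h])
        simp only [sdlChunk, if_pos hp]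
        simpa [Option.getD_some] using hceil
  unfold sorted_division_locations sorted_division_locations_alt
  dsimp only
  have h00 : PySem.List.pyGetD ([0] : List Int) (-1) 0 = 0 := by decide
  rcases lt_trichotomy (sdlChunk (seq.length : Int) np cs) 0 with hlt | heq | hgt
  · rw [pyRange_eq_nil_of_neg _ _ _ hlt (by omega)]
    rw [if_neg (not_lt.mpr (le_of_lt hlt))]
    simp only [List.foldl_nil, h00]
    rw [if_pos (by omega : (0 : Int) ≠ (seq.length : Int))]
    simp
  · exact absurd heq hchunk
  · rw [if_pos hgt]
    rw [uniq_eq_selGo (sdlChunk (seq.length : Int) np cs) (seq.length : Int) hgt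
      (sdlStarts seq) [] 0]
    have hA : (PySem.List.pyRange 0 (seq.length : Int)
          (sdlChunk (seq.length : Int) np cs)).foldl
          (sdlStepA seq (seq.length : Int)) ([PySem.List.pyGetD seq 0 ""], ([0] : List Int))
        = ((PySem.List.pyRange 0 (seq.length : Int)
            (sdlChunk (seq.length : Int) np cs)).filter (fun q => decide ((0 : Int) < q))).foldl
          (sdlStepA seq (seq.length : Int)) ([PySem.List.pyGetD seq 0 ""], ([0] : List Int)) := by
      rw [foldA_drop seq (seq.length : Int) _ _ (pyRange_pos_pairwise 0 _ _ hgt)]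
      simp only [h00]
    rw [show (if PySem.List.pyGetD ((PySem.List.pyRange 0 (seq.length : Int)
          (sdlChunk (seq.length : Int) np cs)).foldl (sdlStepA seq (seq.length : Int))
          ([PySem.List.pyGetD seq 0 ""], ([0] : List Int))).2 (-1) 0 ≠ (seq.length : Int) then
          (((PySem.List.pyRange 0 (seq.length : Int) (sdlChunk (seq.length : Int) np cs)).foldl
            (sdlStepA seq (seq.length : Int))
            ([PySem.List.pyGetD seq 0 ""], ([0] : List Int))).1 ++ [PySem.List.pyGetD seq (-1) ""],
           ((PySem.List.pyRange 0 (seq.length : Int) (sdlChunk (seq.length : Int) np cs)).foldl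
            (sdlStepA seq (seq.length : Int))
            ([PySem.List.pyGetD seq 0 ""], ([0] : List Int))).2 ++ [(seq.length : Int)])
        else (PySem.List.pyRange 0 (seq.length : Int)
          (sdlChunk (seq.length : Int) np cs)).foldl (sdlStepA seq (seq.length : Int))
          ([PySem.List.pyGetD seq 0 ""], ([0] : List Int))) =
        sdlTail seq ((PySem.List.pyRange 0 (seq.length : Int)
          (sdlChunk (seq.length : Int) np cs)).foldl (sdlStepA seq (seq.length : Int))
          ([PySem.List.pyGetD seq 0 ""], ([0] : List Int))) from rfl]
    rw [hA]
    rw [mainA seq (sdlChunk (seq.length : Int) np cs) hgt 0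
      [PySem.List.pyGetD seq 0 ""] [0] (le_refl 0) (by omega) h00]
    have hstarts : (sdlStarts seq).filter (fun s => decide ((0 : Int) < s)) = sdlStarts seq :=
      List.filter_eq_self.mpr (fun s hs => decide_eq_true (by
        have := (mem_sdlStarts seq s).mp hs; omega))
    unfold selMids
    rw [hstarts]
    simp
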